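-- pv_equiv track=rewrite | github.com/D17AN/University-Projects | Year 1 - Semester 1/Fundamentals of Programming/Labs/a1-911/p1.py | min_number_with_same_digits
-- ===== SOURCE A (Python) =====
-- def breaking_in_digits(n):
--     digits = [0]*10  # creating a frequency array and initializing all the values from 0 to 9 with the value 0
--     n_copy = int(n)
--
--     if n_copy == 0:  # particular case, when the input is 0
--         digits[0] = 1
--
--     while n_copy != 0:  # while remained digits in the number
--         c = n_copy % 10  # take the last digit of the value
--         digits[c] += 1  # incrementing the digit position in the frequency array
--         n_copy //= 10  # cutting the last digit
--
--     return digits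
--
-- def min_number_with_same_digits(n):
--     digits = breaking_in_digits(n)
--     m = 0
--     for i in range(1, 10, 1):  # find the smallest non-zero digit for putting in the front of the number
--         if digits[i] != 0:
--             m = m * 10 + i
--             digits[i] -= 1
--             break
--
--     for i in range(0, 10, 1):  # constructing the minimal value by adding each digit of how many times appears in the original number
--         for j in range(1, digits[i] + 1):
--             m = m * 10 + i
--
--     return m
-- ===== SOURCE B (Python) =====
-- def min_number_with_same_digits(n):
--     v = int(n)
--     if v == 0:
--         return 0
--     ds = []
--     while v != 0:
--         ds.append(v % 10)
--         v //= 10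
--     ds.sort()
--     k = next(i for i, d in enumerate(ds) if d != 0)
--     order = [ds[k]] + ds[:k] + ds[k + 1:]
--     m = 0
--     for d in order:
--         m = m * 10 + d
--     return m
-- ===== Notes on version B (the rewrite author's own statement) =====
-- stated objective: simpler
-- what changed: Replaces A's 10-bucket frequency-array counting sort plus two reconstruction loops (find-first-nonzero scan over buckets, then a doubly nested emission loop) with a plain digit list that is sorted ascending, has its first non-zero digit moved to the front, and is folded once into the result.
import Mathlib
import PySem

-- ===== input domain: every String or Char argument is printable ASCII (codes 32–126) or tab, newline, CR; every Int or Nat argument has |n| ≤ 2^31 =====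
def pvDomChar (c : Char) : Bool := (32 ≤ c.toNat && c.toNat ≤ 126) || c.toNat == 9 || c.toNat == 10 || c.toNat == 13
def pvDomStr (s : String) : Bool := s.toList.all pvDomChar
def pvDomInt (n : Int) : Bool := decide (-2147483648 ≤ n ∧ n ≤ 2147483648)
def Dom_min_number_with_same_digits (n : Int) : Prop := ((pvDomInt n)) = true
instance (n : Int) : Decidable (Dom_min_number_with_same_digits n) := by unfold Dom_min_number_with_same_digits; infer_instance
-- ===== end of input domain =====

-- B replaces A's 10-bucket frequency-array counting sort and its three reconstruction loops by
-- sorting the digit list ascending, moving the first non-zero digit to the front, and folding once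
-- (objective: simpler; equal on all n ≥ 0 — both Pythons loop forever on negative n, excluded by Pre_).

-- ===== PORT A =====
-- while n_copy != 0: digits[n_copy % 10] += 1; n_copy //= 10
-- (the guard `0 < ncopy` is a totality guard only: for negative n_copy the Python loop never
--  terminates — those inputs are excluded by Pre_; for 0 ≤ n_copy, `0 < ncopy` ≡ `ncopy ≠ 0`)
def bidLoop (ncopy : Int) (digits : List Int) : List Int :=
  if h : 0 < ncopy then
    bidLoop (PySem.Int.floordiv ncopy 10) (digits.modify (PySem.Int.mod ncopy 10).toNat (· + 1))
  else digits
termination_by ncopy.toNat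
decreasing_by
  rw [PySem.Int.floordiv_eq_ediv_of_pos (by omega : (0:Int) < 10)]
  omega

def breaking_in_digits (n : Int) : List Int :=
  let digits := List.replicate 10 (0 : Int)
  let digits := if n = 0 then digits.set 0 1 else digits
  bidLoop n digits

-- for i in range(1, 10, 1): if digits[i] != 0: m = m*10+i; digits[i] -= 1; break
-- (digits[i] ported as getD: i ∈ 1..9 is always in range of the length-10 list, so getD is exact)
def pvLoop1 (is_ : List Int) (digits : List Int) (m : Int) : Int × List Int :=
  match is_ with
  | [] => (m, digits)
  | i :: rest =>
    if digits.getD i.toNat 0 ≠ 0 then (m * 10 + i, digits.modify i.toNat (· - 1))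
    else pvLoop1 rest digits m

-- for i in range(0, 10, 1): for j in range(1, digits[i] + 1): m = m*10+i
def pvLoop2 (digits : List Int) (m : Int) : Int :=
  (PySem.List.pyRange 0 10 1).foldl (fun m i =>
    (PySem.List.pyRange 1 (digits.getD i.toNat 0 + 1) 1).foldl (fun m _ => m * 10 + i) m) m

def min_number_with_same_digits (n : Int) : Int :=
  let digits := breaking_in_digits n
  let r := pvLoop1 (PySem.List.pyRange 1 10 1) digits 0
  pvLoop2 r.2 r.1

-- ===== PORT B =====
-- while v != 0: ds.append(v % 10); v //= 10
-- (guard `0 < v` is a totality guard only: the Python loop never terminates for negative v,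
--  excluded by Pre_)
def pvCollectDigits (v : Int) : List Int :=
  if h : 0 < v then PySem.Int.mod v 10 :: pvCollectDigits (PySem.Int.floordiv v 10)
  else []
termination_by v.toNat
decreasing_by
  rw [PySem.Int.floordiv_eq_ediv_of_pos (by omega : (0:Int) < 10)]
  omega

def min_number_with_same_digits_alt (n : Int) : Int :=
  let v := n  -- v = int(n): identity on int input
  if v = 0 then 0
  else
    let ds := PySem.List.sorted (pvCollectDigits v) (fun x => x) false
    let k := ds.findIdx (fun d => decide (d ≠ 0))  -- next(i for i, d in enumerate(ds) if d != 0)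
    -- order = [ds[k]] + ds[:k] + ds[k+1:]  (k is in range, slice bounds nonnegative: take/drop are exact)
    let order := ds.getD k 0 :: (ds.take k ++ ds.drop (k + 1))
    order.foldl (fun m d => m * 10 + d) 0

-- ===== PRECONDITION & SPEC =====
-- Pre_ excludes negative n, on which both Python A and Python B loop forever (no return value).
def Pre_min_number_with_same_digits (n : Int) : Prop := 0 ≤ n
instance (n : Int) : Decidable (Pre_min_number_with_same_digits n) := by
  unfold Pre_min_number_with_same_digits; infer_instance
def pvWitness_min_number_with_same_digits : Int := 907

def Spec_min_number_with_same_digits (n : Int) (out : Int) : Prop := out = min_number_with_same_digits_alt n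
instance (n : Int) (out : Int) : Decidable (Spec_min_number_with_same_digits n out) := by unfold Spec_min_number_with_same_digits; infer_instance

-- ===== CLAIM (what is proved, stated in full; the proofs are below) =====
def Claim_equal_min_number_with_same_digits : Prop := ∀ (n : Int), Dom_min_number_with_same_digits n → Pre_min_number_with_same_digits n → Spec_min_number_with_same_digits n (min_number_with_same_digits n)

-- ===== LEMMAS AND PROOFS =====

-- digit-expansion machinery: pvE c a len = replicate (c a) a ++ … ++ replicate (c (a+len-1)) (a+len-1)
def pvRep (c : Nat → Nat) (i : Nat) : List Int := List.replicate (c i) (i : Int)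
def pvE (c : Nat → Nat) (a len : Nat) : List Int := (List.range' a len).flatMap (pvRep c)
def pvCnt (n : Int) (i : Nat) : Nat := (pvCollectDigits n).count (i : Int)

lemma pvE_succ (c : Nat → Nat) (a len : Nat) :
    pvE c a (len + 1) = List.replicate (c a) (a : Int) ++ pvE c (a + 1) len := by
  simp [pvE, List.range'_succ, pvRep]

lemma pvE_append (c : Nat → Nat) (a m k : Nat) :
    pvE c a (m + k) = pvE c a m ++ pvE c (a + m) k := by
  rw [pvE, pvE, pvE, ← List.range'_append_1, List.flatMap_append]

lemma pvCollect_mem (v : Int) : ∀ x ∈ pvCollectDigits v, 0 ≤ x ∧ x < 10 := by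
  induction v using pvCollectDigits.induct with
  | case1 v hv ih =>
    rw [pvCollectDigits, dif_pos hv]
    intro x hx
    rcases List.mem_cons.mp hx with h | h
    · subst h
      exact ⟨PySem.Int.mod_nonneg _ (by omega), PySem.Int.mod_lt _ (by omega)⟩
    · exact ih x h
  | case2 v hv => rw [pvCollectDigits, dif_neg hv]; simp

lemma pvCollect_exists_nz (v : Int) (hv : 0 < v) : ∃ x ∈ pvCollectDigits v, x ≠ 0 := by
  induction v using pvCollectDigits.induct with
  | case1 v hv' ih =>
    rw [pvCollectDigits, dif_pos hv']
    by_cases hq : 0 < PySem.Int.floordiv v 10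
    · obtain ⟨x, hx, hxnz⟩ := ih hq
      exact ⟨x, List.mem_cons_of_mem _ hx, hxnz⟩
    · refine ⟨PySem.Int.mod v 10, List.mem_cons_self, ?_⟩
      rw [PySem.Int.mod_eq_emod_of_pos (by omega)]
      rw [PySem.Int.floordiv_eq_ediv_of_pos (by omega : (0:Int) < 10)] at hq
      omega
  | case2 v hv' => omega

lemma bidLoop_length (v : Int) (d : List Int) : (bidLoop v d).length = d.length := by
  induction v, d using bidLoop.induct with
  | case1 v d hv ih => rw [bidLoop, dif_pos hv]; rw [ih]; simp
  | case2 v d hv => rw [bidLoop, dif_neg hv]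

lemma bidLoop_getD (v : Int) (d : List Int) (hlen : d.length = 10) (j : Nat) (hj : j < 10) :
    (bidLoop v d).getD j 0 = d.getD j 0 + ((pvCollectDigits v).count (j : Int) : Int) := by
  induction v, d using bidLoop.induct with
  | case1 v d hv ih =>
    rw [bidLoop, dif_pos hv, pvCollectDigits, dif_pos hv]
    rw [ih (by simp [hlen])]
    have hm0 : 0 ≤ PySem.Int.mod v 10 := PySem.Int.mod_nonneg _ (by omega)
    have hm10 : PySem.Int.mod v 10 < 10 := PySem.Int.mod_lt _ (by omega)
    have hjd : j < d.length := by omega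
    rw [List.getD_eq_getElem _ _ (by simpa using hjd), List.getD_eq_getElem _ _ hjd]
    rw [List.getElem_modify]
    rw [List.count_cons]
    by_cases hk : (PySem.Int.mod v 10).toNat = j
    · have hmj : PySem.Int.mod v 10 = (j : Int) := by omega
      rw [PySem.Int.mod_eq_emod_of_pos (by omega : (0:Int) < 10)] at hk hmj
      simp [hk, hmj]
      omega
    · have hmj : ¬ (PySem.Int.mod v 10 = (j : Int)) := by omega
      rw [PySem.Int.mod_eq_emod_of_pos (by omega : (0:Int) < 10)] at hk hmj
      simp [hk, hmj]
  | case2 v d hv =>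
    rw [bidLoop, dif_neg hv, pvCollectDigits, dif_neg hv]
    simp

lemma pvE_count (c : Nat → Nat) (a len : Nat) (x : Int) :
    (pvE c a len).count x
      = if 0 ≤ x ∧ a ≤ x.toNat ∧ x.toNat < a + len then c x.toNat else 0 := by
  induction len generalizing a with
  | zero => simp only [pvE, List.range'_zero, List.flatMap_nil, List.count_nil]; split_ifs with h <;> omega
  | succ len ih =>
    rw [pvE_succ, List.count_append, ih, List.count_replicate]
    simp only [beq_iff_eq]
    by_cases hax : (a : Int) = x
    · have hxa : x.toNat = a := by omega
      rw [hxa]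
      split_ifs <;> omega
    · split_ifs <;> omega

lemma pvE_pairwise (c : Nat → Nat) (a len : Nat) :
    (pvE c a len).Pairwise (· ≤ ·) ∧ ∀ x ∈ pvE c a len, (a : Int) ≤ x := by
  induction len generalizing a with
  | zero => simp [pvE]
  | succ len ih =>
    rw [pvE_succ]
    obtain ⟨hp, hb⟩ := ih (a + 1)
    constructor
    · rw [List.pairwise_append]
      refine ⟨List.pairwise_replicate.mpr (by simp), hp, ?_⟩
      intro x hx y hy
      have h1 := hb y hy
      have hx' : x = (a : Int) := List.eq_of_mem_replicate hx
      push_cast at h1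
      omega
    · intro x hx
      rcases List.mem_append.mp hx with h | h
      · rw [List.eq_of_mem_replicate h]
      · have := hb x h; push_cast at this ⊢; omega

lemma pvE_congr (c₁ c₂ : Nat → Nat) (a len : Nat)
    (h : ∀ i, a ≤ i → i < a + len → c₁ i = c₂ i) : pvE c₁ a len = pvE c₂ a len := by
  induction len generalizing a with
  | zero => simp [pvE]
  | succ len ih =>
    rw [pvE_succ, pvE_succ, h a (le_refl a) (by omega), ih (a+1) (fun i h1 h2 => h i (by omega) (by omega))]

lemma pvE_zeros (c : Nat → Nat) (a len : Nat) (h : ∀ i, a ≤ i → i < a + len → c i = 0) :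
    pvE c a len = [] := by
  induction len generalizing a with
  | zero => simp [pvE]
  | succ len ih =>
    rw [pvE_succ, h a (le_refl a) (by omega), ih (a+1) (fun i h1 h2 => h i (by omega) (by omega))]
    simp

lemma pvE_split (c : Nat → Nat) (d : Nat) (hd1 : 1 ≤ d) (hd9 : d < 10)
    (hz : ∀ i, 1 ≤ i → i < d → c i = 0) :
    pvE c 0 10 = List.replicate (c 0) 0 ++ (List.replicate (c d) (d : Int) ++ pvE c (d + 1) (9 - d)) := by
  have h10 : 10 = d + (10 - d) := by omega
  rw [h10, pvE_append, Nat.zero_add]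
  have hd' : d = 1 + (d - 1) := by omega
  have h1 : pvE c 0 d = List.replicate (c 0) 0 := by
    rw [hd', pvE_append]
    rw [pvE_zeros c (0+1) (d-1) (fun i hi1 hi2 => hz i hi1 (by omega))]
    have h01 : pvE c 0 1 = List.replicate (c 0) 0 := by
      rw [pvE_succ, pvE]; simp
    simp [h01]
  have h2 : 10 - d = (9 - d) + 1 := by omega
  rw [h1, h2, pvE_succ]

lemma pvSorted_eq (n : Int) :
    PySem.List.sorted (pvCollectDigits n) (fun x => x) false = pvE (pvCnt n) 0 10 := by
  apply PySem.List.sorted_id_eq_of_perm_of_pairwise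
  · rw [List.perm_iff_count]
    intro a
    rw [pvE_count]
    by_cases h : 0 ≤ a ∧ a.toNat < 10
    · have ha : ((a.toNat : Nat) : Int) = a := by omega
      rw [if_pos ⟨h.1, Nat.zero_le _, by omega⟩, pvCnt, ha]
    · rw [if_neg (by omega)]
      symm
      rw [List.count_eq_zero]
      intro hmem
      have := pvCollect_mem n a hmem
      omega
  · exact (pvE_pairwise _ _ _).1

lemma pvFindIdx_rep (m : Nat) (y : Int) (t : List Int) (hy : y ≠ 0) :
    (List.replicate m (0 : Int) ++ y :: t).findIdx (fun d => decide (d ≠ 0)) = m := by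
  induction m with
  | zero => simp [List.findIdx_cons, hy]
  | succ m ih => rw [List.replicate_succ, List.cons_append, List.findIdx_cons, ih]; simp

lemma pvFoldl_const_replicate (x i s : Int) :
    (PySem.List.pyRange 1 (x + 1) 1).foldl (fun m _ => m * 10 + i) s
      = (List.replicate x.toNat i).foldl (fun m d => m * 10 + d) s := by
  have hlen : (PySem.List.pyRange 1 (x + 1) 1).length = x.toNat := by
    rw [PySem.List.pyRange_of_pos _ _ (by omega)]
    simp only [List.length_map, List.length_range]
    split_ifs with h
    · simp
    · omega
  rw [List.foldl_const, hlen]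
  induction x.toNat generalizing s with
  | zero => simp
  | succ k ih => rw [List.replicate_succ, List.foldl_cons, Function.iterate_succ_apply, ih]

lemma pvLoop2_eq (digits : List Int) (m : Int) :
    pvLoop2 digits m
      = (pvE (fun i => (digits.getD i 0).toNat) 0 10).foldl (fun m d => m * 10 + d) m := by
  have hr : PySem.List.pyRange 0 10 1 = [0,1,2,3,4,5,6,7,8,9] := by decide
  have hr2 : List.range' 0 10 = [0,1,2,3,4,5,6,7,8,9] := by decide
  rw [pvLoop2, hr, pvE, hr2]
  simp only [List.flatMap_cons, List.flatMap_nil, List.append_nil, pvRep]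
  simp only [List.foldl_cons, List.foldl_nil, List.foldl_append]
  simp only [pvFoldl_const_replicate]
  norm_num [Int.toNat]

lemma pvLoop1_gen (len : Nat) : ∀ (a : Nat) (F : List Int) (m : Int) (c : Nat → Nat) (d : Nat),
    (∀ i, i < 10 → F.getD i 0 = (c i : Int)) → a ≤ d → d < a + len → a + len ≤ 10 →
    (∀ i, a ≤ i → i < d → c i = 0) → c d ≠ 0 →
    pvLoop1 ((List.range' a len).map (Nat.cast : Nat → Int)) F m = (m * 10 + (d : Int), F.modify d (· - 1)) := by
  induction len with
  | zero => intro a F m c d _ _ h2 _ _ _; omega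
  | succ len ih =>
    intro a F m c d hF had hdlt hlen hz hdnz
    rw [List.range'_succ, List.map_cons, pvLoop1]
    simp only [Int.toNat_natCast]
    rcases Nat.eq_or_lt_of_le had with he | hl
    · subst he
      rw [if_pos (by rw [hF a (by omega)]; exact_mod_cast hdnz)]
    · rw [if_neg (by rw [hF a (by omega), hz a (le_refl a) hl]; simp)]
      exact ih (a + 1) F m c d hF hl (by omega) (by omega)
        (fun i h1 h2 => hz i (by omega) h2) hdnz

lemma pvLoop1_eq (F : List Int) (c : Nat → Nat) (d : Nat)
    (hF : ∀ i, i < 10 → F.getD i 0 = (c i : Int))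
    (hd1 : 1 ≤ d) (hd9 : d ≤ 9) (hdez : c d ≠ 0) (hz : ∀ i, 1 ≤ i → i < d → c i = 0) :
    pvLoop1 (PySem.List.pyRange 1 10 1) F 0 = ((d : Int), F.modify d (· - 1)) := by
  have hr : PySem.List.pyRange 1 10 1 = (List.range' 1 9).map (Nat.cast : Nat → Int) := by decide
  rw [hr, pvLoop1_gen 9 1 F 0 c d hF hd1 (by omega) (by omega) (fun i h1 h2 => hz i h1 h2) hdez]
  norm_num

-- ===== VERDICT (by name: the statement is the Claim_ definition above) =====
theorem min_number_with_same_digits_spec : Claim_equal_min_number_with_same_digits := by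
  intro n _ hpre
  unfold Spec_min_number_with_same_digits
  unfold Pre_min_number_with_same_digits at hpre
  by_cases h0 : n = 0
  · subst h0
    have hA : min_number_with_same_digits 0 = 0 := by
      rw [min_number_with_same_digits, breaking_in_digits, bidLoop]
      norm_num
      decide
    rw [hA]
    simp [min_number_with_same_digits_alt]
  · have hn : 0 < n := by omega
    have hFlen : (breaking_in_digits n).length = 10 := by
      rw [breaking_in_digits]
      simp only [if_neg h0, bidLoop_length, List.length_replicate]
    have hF : ∀ i, i < 10 → (breaking_in_digits n).getD i 0 = ((pvCnt n i : Nat) : Int) := by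
      intro i hi
      rw [breaking_in_digits]
      simp only [if_neg h0]
      rw [bidLoop_getD _ _ (by simp) i hi]
      rw [List.getD_eq_getElem _ _ (by simpa using hi), List.getElem_replicate]
      rw [pvCnt]
      omega
    -- d := the least index 1 ≤ d ≤ 9 with pvCnt n d ≠ 0
    obtain ⟨x, hxmem, hxnz⟩ := pvCollect_exists_nz n hn
    obtain ⟨hx0, hx10⟩ := pvCollect_mem n x hxmem
    have hPex : ∃ i : Nat, 1 ≤ i ∧ pvCnt n i ≠ 0 := by
      refine ⟨x.toNat, by omega, ?_⟩
      rw [pvCnt, show ((x.toNat : Nat) : Int) = x by omega]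
      have := List.count_pos_iff.mpr hxmem
      omega
    have hd1 : 1 ≤ Nat.find hPex := (Nat.find_spec hPex).1
    have hdnz : pvCnt n (Nat.find hPex) ≠ 0 := (Nat.find_spec hPex).2
    have hd9 : Nat.find hPex ≤ 9 := by
      have hfle : Nat.find hPex ≤ x.toNat := Nat.find_min' hPex ⟨by omega, by
        rw [pvCnt, show ((x.toNat : Nat) : Int) = x by omega]
        have := List.count_pos_iff.mpr hxmem
        omega⟩
      omega
    have hz : ∀ i, 1 ≤ i → i < Nat.find hPex → pvCnt n i = 0 := by
      intro i h1 h2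
      have := Nat.find_min hPex h2
      tauto
    set c := pvCnt n with hc
    set d := Nat.find hPex with hdd
    set Z : List Int := List.replicate (c 0) 0 with hZ
    set T : List Int := List.replicate (c d - 1) (d : Int) ++ pvE c (d + 1) (9 - d) with hT
    have hdnz2 : c d ≠ 0 := by rw [hc]; exact hdnz
    have hz2 : ∀ i, 1 ≤ i → i < d → c i = 0 := by intro i a b; rw [hc]; exact hz i a b
    have hrep : List.replicate (c d) (d : Int) = (d : Int) :: List.replicate (c d - 1) (d : Int) := by
      conv_lhs => rw [show c d = (c d - 1) + 1 from by omega]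
      rw [List.replicate_succ]
    have hsplit : pvE c 0 10 = Z ++ (d : Int) :: T := by
      rw [pvE_split c d hd1 (by omega) hz2, hrep, hT, hZ]
      simp
    have hc' : ∀ i, 0 ≤ i → i < 0 + 10 →
        ((((breaking_in_digits n).modify d (· - 1)).getD i 0).toNat : Nat)
          = (if i = d then c d - 1 else c i) := by
      intro i _ hi
      have hi10 : i < 10 := by omega
      have hilen : i < ((breaking_in_digits n).modify d (· - 1)).length := by simp [hFlen]; omega
      rw [List.getD_eq_getElem _ _ hilen, List.getElem_modify]
      have hFi : (breaking_in_digits n)[i] = ((c i : Nat) : Int) := by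
        rw [← List.getD_eq_getElem _ (0 : Int) (by omega : i < (breaking_in_digits n).length), hF i hi10]
      by_cases hid : i = d
      · rw [if_pos (by omega), if_pos hid, hFi, hid]
        omega
      · rw [if_neg (by omega), if_neg hid, hFi]
        omega
    have hsplit' : pvE (fun i => (((breaking_in_digits n).modify d (· - 1)).getD i 0).toNat) 0 10
        = Z ++ T := by
      rw [pvE_congr _ (fun i => if i = d then c d - 1 else c i) 0 10 hc']
      rw [pvE_split (fun i => if i = d then c d - 1 else c i) d hd1 (by omega)
        (fun i hi1 hi2 => by
          show (if i = d then c d - 1 else c i) = 0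
          rw [if_neg (by omega)]; exact hz2 i hi1 hi2)]
      simp only [if_true, if_neg (show ¬ (0 : Nat) = d by omega)]
      rw [pvE_congr (fun i => if i = d then c d - 1 else c i) c (d + 1) (9 - d)
        (fun i hi1 hi2 => by
          show (if i = d then c d - 1 else c i) = c i
          rw [if_neg (by omega)])]
    -- A's value
    have hA : min_number_with_same_digits n
        = (Z ++ T).foldl (fun m dg => m * 10 + dg) (d : Int) := by
      rw [min_number_with_same_digits]
      rw [pvLoop1_eq (breaking_in_digits n) c d hF hd1 hd9 hdnz2 hz2]
      rw [pvLoop2_eq, hsplit']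
    -- B's value
    rw [min_number_with_same_digits_alt]
    simp only [if_neg h0]
    rw [pvSorted_eq n, hsplit]
    rw [pvFindIdx_rep (c 0) (d : Int) T (by exact_mod_cast (by omega : ¬ (d : Nat) = 0))]
    have hget : (List.replicate (c 0) (0 : Int) ++ (d : Int) :: T).getD (c 0) 0 = (d : Int) := by
      rw [List.getD_eq_getElem _ _ (by simp)]
      rw [List.getElem_append_right (by simp)]
      simp
    have htake : (List.replicate (c 0) (0 : Int) ++ (d : Int) :: T).take (c 0) = Z :=
      List.take_left' (by simp [hZ])
    have hdrop : (List.replicate (c 0) (0 : Int) ++ (d : Int) :: T).drop (c 0 + 1) = T := by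
      rw [show List.replicate (c 0) (0 : Int) ++ (d : Int) :: T
            = (List.replicate (c 0) (0 : Int) ++ [(d : Int)]) ++ T by simp]
      exact List.drop_left' (by simp)
    rw [hZ] at htake ⊢
    rw [hget, htake, hdrop, hA]
    rw [List.foldl_cons]
    norm_num
    rw [hZ]
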